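-- pv_equiv track=rewrite | github.com/CodingTestKiller/Season3 | 8주차/디펜스게임/ironAiken2.py | solution
-- ===== SOURCE A (Python) =====
-- from heapq import heappush, heappop
--
-- def solution(n, k, enemy):
--     heap = []
--
--     for i in range(len(enemy)):
--         heappush(heap, enemy[i])
--         if len(heap) > k:
--             n -= heappop(heap)
--             if n < 0:
--                 return i
--
--     return len(enemy)
-- ===== SOURCE B (Python) =====
-- def solution(n, k, enemy):
--     total = 0
--     for i in range(len(enemy)):
--         total += enemy[i]
--         if i + 1 > k:
--             covered = sum(sorted(enemy[:i + 1])[-k:]) if k > 0 else 0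
--             if total - covered > n:
--                 return i
--     return len(enemy)
-- ===== Notes on version B (the rewrite author's own statement) =====
-- stated objective: alternative
-- what changed: Replaces the streaming min-heap simulation by a direct scan that, at each wave past the k-th, recomputes the remaining cost explicitly as prefix sum minus the sum of the k largest waves of the prefix (obtained by sorting the prefix).
import Mathlib
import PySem

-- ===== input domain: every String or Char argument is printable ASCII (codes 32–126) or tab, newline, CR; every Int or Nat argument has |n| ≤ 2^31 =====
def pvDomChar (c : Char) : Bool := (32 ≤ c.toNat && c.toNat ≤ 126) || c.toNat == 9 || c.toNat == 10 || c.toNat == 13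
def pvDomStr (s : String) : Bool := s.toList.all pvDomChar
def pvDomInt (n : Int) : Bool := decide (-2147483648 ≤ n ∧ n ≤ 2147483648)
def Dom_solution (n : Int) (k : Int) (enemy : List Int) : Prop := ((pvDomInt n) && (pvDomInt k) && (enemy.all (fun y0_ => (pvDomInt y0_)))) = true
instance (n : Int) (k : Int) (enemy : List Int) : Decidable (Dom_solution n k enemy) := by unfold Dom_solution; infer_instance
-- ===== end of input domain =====

-- B replaces A's streaming min-heap by a scan that recomputes the cost of each prefix
-- from a sort of that prefix (an alternative decomposition, not claimed faster).

-- ===== PORT A =====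
-- The heapq heap is modeled by the multiset of its elements: heappush = cons,
-- heappop = remove a minimum (PySem.List.min? + erase).  This is exact for the
-- returned value, which depends on the heap only through the popped minima.
def solGo (k : Int) : Int → List Int → Int → List Int → Int
  | _, _, i, [] => i
  | n, heap, i, e :: rest =>
    let h1 := e :: heap
    if k < (h1.length : Int) then
      let m := (PySem.List.min? h1 (fun x => x)).getD 0
      let n' := n - m
      if n' < 0 then i else solGo k n' (h1.erase m) (i + 1) rest
    else solGo k n h1 (i + 1) rest

def solution (n : Int) (k : Int) (enemy : List Int) : Int :=
  solGo k n [] 0 enemy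

-- ===== PORT B =====
-- sorted(pref)[-k:] : slice with negative start; sum of the k largest of pref.
def coveredB (k : Int) (pref : List Int) : Int :=
  if 0 < k then
    (PySem.List.slice (PySem.List.sorted pref (fun x => x) false) (some (-k)) none).sum
  else 0

def altGo (n : Int) (k : Int) : Int → List Int → List Int → Int
  | _, pref, [] => (pref.length : Int)
  | total, pref, e :: rest =>
    let total' := total + e
    let pref' := pref ++ [e]
    if k < (pref'.length : Int) then
      if n < total' - coveredB k pref' then (pref.length : Int)
      else altGo n k total' pref' rest
    else altGo n k total' pref' rest

def solution_alt (n : Int) (k : Int) (enemy : List Int) : Int :=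
  altGo n k 0 [] enemy

-- ===== PRECONDITION & SPEC =====
def Spec_solution (n : Int) (k : Int) (enemy : List Int) (out : Int) : Prop := out = solution_alt n k enemy
instance (n : Int) (k : Int) (enemy : List Int) (out : Int) : Decidable (Spec_solution n k enemy out) := by unfold Spec_solution; infer_instance

-- ===== CLAIM (what is proved, stated in full; the proofs are below) =====
def Claim_equal_solution : Prop := ∀ (n : Int) (k : Int) (enemy : List Int), Dom_solution n k enemy → Spec_solution n k enemy (solution n k enemy)

-- ===== LEMMAS AND PROOFS =====

-- the ascending sort used throughout
def sortA (l : List Int) : List Int := PySem.List.sorted l (fun x => x) false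

-- the k (clamped) largest elements of l, as the tail of its ascending sort
def topK (k : Int) (l : List Int) : List Int := (sortA l).drop (l.length - k.toNat)

-- the popped minimum
def pmin (l : List Int) : Int := (PySem.List.min? l (fun x => x)).getD 0

theorem sortA_perm (l : List Int) : (sortA l).Perm l :=
  PySem.List.sorted_perm _ _ _

theorem sortA_sorted (l : List Int) : List.Pairwise (· ≤ ·) (sortA l) :=
  PySem.List.sorted_pairwise l _

theorem sortA_length (l : List Int) : (sortA l).length = l.length :=
  PySem.List.length_sorted _ _ _

theorem sortA_append_singleton (l : List Int) (e : Int) :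
    sortA (l ++ [e]) = List.orderedInsert (· ≤ ·) e (sortA l) := by
  have hperm : (sortA (l ++ [e])).Perm (List.orderedInsert (· ≤ ·) e (sortA l)) := by
    refine ((sortA_perm (l ++ [e])).trans ?_).trans (List.perm_orderedInsert _ _ _).symm
    exact (List.perm_append_singleton e l).trans ((sortA_perm l).symm.cons e)
  exact hperm.eq_of_pairwise (fun _ _ _ _ h1 h2 => le_antisymm h1 h2)
    (sortA_sorted _) (List.Pairwise.orderedInsert _ _ (sortA_sorted l))

theorem min?_some_of_ne_nil {l : List Int} (hne : l ≠ []) :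
    ∃ m, PySem.List.min? l (fun x => x) = some m := by
  cases hm : PySem.List.min? l (fun x => x) with
  | none => exact absurd ((PySem.List.min?_eq_none_iff _ _).mp hm) hne
  | some m => exact ⟨m, rfl⟩

theorem pmin_eq {l : List Int} {a : Int} (ha : a ∈ l) (hmin : ∀ x ∈ l, a ≤ x) :
    pmin l = a := by
  obtain ⟨m, hm⟩ := min?_some_of_ne_nil (List.ne_nil_of_mem ha)
  have h1 : m ∈ l := PySem.List.min?_mem hm
  have h2 : ∀ y ∈ l, m ≤ y := PySem.List.min?_isMin hm
  have : m = a := le_antisymm (h2 a ha) (hmin m h1)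
  simp [pmin, hm, this]

theorem pmin_mem {l : List Int} (hne : l ≠ []) : pmin l ∈ l := by
  obtain ⟨m, hm⟩ := min?_some_of_ne_nil hne
  simpa [pmin, hm] using PySem.List.min?_mem hm

theorem pmin_isMin {l : List Int} (hne : l ≠ []) : ∀ y ∈ l, pmin l ≤ y := by
  obtain ⟨m, hm⟩ := min?_some_of_ne_nil hne
  simpa [pmin, hm] using PySem.List.min?_isMin hm

theorem pmin_perm {l1 l2 : List Int} (h : l1.Perm l2) (hne : l1 ≠ []) :
    pmin l1 = pmin l2 := by
  have hne2 : l2 ≠ [] := by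
    intro h2; subst h2; exact hne h.eq_nil
  have hmem : pmin l1 ∈ l2 := h.mem_iff.mp (pmin_mem hne)
  have hmin : ∀ x ∈ l2, pmin l1 ≤ x := fun x hx => pmin_isMin hne x (h.mem_iff.mpr hx)
  exact (pmin_eq hmem hmin).symm

-- central step lemma: push e onto the k largest of a sorted prefix and pop the
-- minimum; what remains is the k largest of the extended prefix
theorem CL (e : Int) : ∀ (s : List Int), List.Pairwise (· ≤ ·) s → ∀ j : Nat,
    ((e :: s.drop j).erase (pmin (e :: s.drop j))).Perm
      ((List.orderedInsert (· ≤ ·) e s).drop (j + 1)) := by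
  intro s
  induction s with
  | nil =>
    intro _ j
    simp [pmin_eq (List.mem_singleton_self e) (by simp)]
  | cons b s' ih =>
    intro hs j
    have hb : ∀ x ∈ s', b ≤ x := (List.pairwise_cons.mp hs).1
    have hs' : List.Pairwise (· ≤ ·) s' := (List.pairwise_cons.mp hs).2
    by_cases heb : e ≤ b
    · rw [List.orderedInsert, if_pos heb]
      cases j with
      | zero =>
        have hmin : pmin (e :: b :: s') = e := by
          refine pmin_eq List.mem_cons_self ?_
          intro x hx
          rcases List.mem_cons.mp hx with h | hx
          · omega
          · rcases List.mem_cons.mp hx with h | hx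
            · omega
            · exact le_trans heb (hb x hx)
        simp [hmin]
      | succ j' =>
        have hd : (b :: s').drop (j' + 1) = s'.drop j' := by simp
        rw [hd]
        have hmin : pmin (e :: s'.drop j') = e := by
          refine pmin_eq List.mem_cons_self ?_
          intro x hx
          rcases List.mem_cons.mp hx with h | hx
          · omega
          · exact le_trans heb (hb x (List.mem_of_mem_drop hx))
        simp [hmin]
    · rw [List.orderedInsert, if_neg heb]
      cases j with
      | zero =>
        have hmin : pmin (e :: b :: s') = b := by
          refine pmin_eq (List.mem_cons_of_mem e List.mem_cons_self) ?_
          intro x hx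
          rcases List.mem_cons.mp hx with h | hx
          · omega
          · rcases List.mem_cons.mp hx with h | hx
            · omega
            · exact hb x hx
        simp only [List.drop_zero] at hmin ⊢
        rw [hmin]
        rw [List.erase_cons_tail (by simp; omega), List.erase_cons_head]
        simpa using (List.perm_orderedInsert (· ≤ ·) e s').symm
      | succ j' =>
        have hd : (b :: s').drop (j' + 1) = s'.drop j' := by simp
        have hd2 : (b :: List.orderedInsert (· ≤ ·) e s').drop (j' + 1 + 1)
            = (List.orderedInsert (· ≤ ·) e s').drop (j' + 1) := by simp
        rw [hd, hd2]
        exact ih hs' j'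

theorem coveredB_eq (k : Int) (l : List Int) : coveredB k l = (topK k l).sum := by
  by_cases hk : 0 < k
  · have hkn : 0 < k.toNat := by omega
    have hkk : -((k.toNat : Nat) : Int) = -k := by omega
    rw [coveredB, if_pos hk, topK, ← hkk,
      PySem.List.slice_from_neg_natCast _ _ hkn]
    simp only [sortA, PySem.List.length_sorted]
  · have hkn : k.toNat = 0 := by omega
    rw [coveredB, if_neg hk, topK, hkn]
    rw [Nat.sub_zero, ← sortA_length l, List.drop_length]
    rfl

theorem main_inv (n0 k : Int) : ∀ (rest pref heap : List Int),
    heap.Perm (topK k pref) →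
    solGo k (n0 - (pref.sum - heap.sum)) heap (pref.length : Int) rest
      = altGo n0 k pref.sum pref rest := by
  intro rest
  induction rest with
  | nil => intro pref heap _; simp [solGo, altGo]
  | cons e rest ih =>
    intro pref heap hp
    have hlen : heap.length = min k.toNat pref.length := by
      have h := hp.length_eq
      simp only [topK, List.length_drop, sortA_length] at h
      omega
    by_cases hc : k < ((e :: heap).length : Int)
    · -- pop branch
      have hc1 : k < (heap.length : Int) + 1 := by
        simpa [Int.add_comm] using hc
      have hkle : k.toNat ≤ pref.length := by omega
      have hcB : k < (((pref ++ [e]).length : Nat) : Int) := by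
        simp only [List.length_append, List.length_cons, List.length_nil]
        push_cast
        omega
      -- the popped minimum
      have hperm1 : (e :: heap).Perm (e :: (sortA pref).drop (pref.length - k.toNat)) :=
        hp.cons e
      have hm : pmin (e :: heap) = pmin (e :: (sortA pref).drop (pref.length - k.toNat)) :=
        pmin_perm hperm1 (by simp)
      have hperm2 : ((e :: heap).erase (pmin (e :: heap))).Perm (topK k (pref ++ [e])) := by
        have h1 := hperm1.erase (pmin (e :: heap))
        rw [hm] at h1 ⊢
        refine h1.trans ?_
        have h2 := CL e (sortA pref) (sortA_sorted pref) (pref.length - k.toNat)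
        refine h2.trans ?_
        rw [topK, ← sortA_append_singleton]
        have : (pref ++ [e]).length - k.toNat = pref.length - k.toNat + 1 := by
          simp only [List.length_append, List.length_cons, List.length_nil]
          omega
        rw [this]
      have hmem : pmin (e :: heap) ∈ e :: heap := pmin_mem (by simp)
      have hsum_erase : pmin (e :: heap) + ((e :: heap).erase (pmin (e :: heap))).sum
          = (e :: heap).sum := List.sum_erase hmem
      have hsum2 : ((e :: heap).erase (pmin (e :: heap))).sum = (topK k (pref ++ [e])).sum :=
        hperm2.sum_eq
      have hcov : coveredB k (pref ++ [e]) = ((e :: heap).erase (pmin (e :: heap))).sum := by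
        rw [coveredB_eq, hsum2]
      -- unfold one step of each loop
      rw [solGo, altGo]
      simp only [if_pos hc, if_pos hcB]
      have hpm : (PySem.List.min? (e :: heap) (fun x => x)).getD 0 = pmin (e :: heap) := rfl
      rw [hpm]
      have hsum_cons : (e :: heap).sum = e + heap.sum := by simp
      have hsum_app : (pref ++ [e]).sum = pref.sum + e := by simp
      by_cases hfail : n0 - (pref.sum - heap.sum) - pmin (e :: heap) < 0
      · rw [if_pos hfail, if_pos (by rw [hcov]; omega)]
      · rw [if_neg hfail, if_neg (by rw [hcov]; omega)]
        have hIH := ih (pref ++ [e]) ((e :: heap).erase (pmin (e :: heap))) hperm2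
        have harg : n0 - ((pref ++ [e]).sum - ((e :: heap).erase (pmin (e :: heap))).sum)
            = n0 - (pref.sum - heap.sum) - pmin (e :: heap) := by
          rw [hsum_app]; omega
        have hi : (((pref ++ [e]).length : Nat) : Int) = (pref.length : Int) + 1 := by
          simp
        rw [harg, hi, hsum_app] at hIH
        exact hIH
    · -- no-pop branch
      have hc1 : ¬ k < (heap.length : Int) + 1 := by
        intro h; exact hc (by simpa [Int.add_comm] using h)
      have hgt : pref.length + 1 ≤ k.toNat := by omega
      have hcB : ¬ k < (((pref ++ [e]).length : Nat) : Int) := by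
        simp only [List.length_append, List.length_cons, List.length_nil]
        push_cast
        omega
      have htop : topK k pref = sortA pref := by
        rw [topK, Nat.sub_eq_zero_of_le (by omega), List.drop_zero]
      have hp' : heap.Perm pref := by
        rw [htop] at hp
        exact hp.trans (sortA_perm pref)
      have hperm2 : (e :: heap).Perm (topK k (pref ++ [e])) := by
        have htop2 : topK k (pref ++ [e]) = sortA (pref ++ [e]) := by
          rw [topK, Nat.sub_eq_zero_of_le (by simp; omega), List.drop_zero]
        rw [htop2]
        refine ((hp'.cons e).trans ?_).trans (sortA_perm (pref ++ [e])).symm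
        exact (List.perm_append_singleton e pref).symm
      rw [solGo, altGo]
      simp only [if_neg hc, if_neg hcB]
      have hIH := ih (pref ++ [e]) (e :: heap) hperm2
      have harg : n0 - ((pref ++ [e]).sum - (e :: heap).sum)
          = n0 - (pref.sum - heap.sum) := by
        have := hp'.sum_eq
        simp only [List.sum_append, List.sum_cons, List.sum_nil]
        omega
      have hi : (((pref ++ [e]).length : Nat) : Int) = (pref.length : Int) + 1 := by
        simp
      have hsum_app : (pref ++ [e]).sum = pref.sum + e := by simp
      rw [harg, hi, hsum_app] at hIH
      exact hIH

-- ===== VERDICT (by name: the statement is the Claim_ definition above) =====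
theorem solution_spec : Claim_equal_solution := by
  intro n k enemy _
  unfold Spec_solution solution solution_alt
  have h0 : ([] : List Int).Perm (topK k []) := by
    have ht : topK k [] = [] := by
      simp [topK, sortA, PySem.List.sorted_eq_nil_iff]
    rw [ht]
  have h := main_inv n k enemy [] [] h0
  simpa using h
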